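-- pv_equiv track=rewrite | github.com/NKrvavica/AdventofCode2023 | day03.py | parse_symbols_and_positions
-- ===== SOURCE A (Python) =====
-- def parse_symbols_and_positions(row, input_string):
--     result = set()
--     gears = set()
--     for i, char in enumerate(input_string):
--         if not char.isdigit() and char != '.':
--             result.add((row, i))
--             if char == '*':
--                 gears.add((row, i))
--     return result, gears
-- ===== SOURCE B (Python) =====
-- def parse_symbols_and_positions(row, input_string):
--     # Character-class driven search: for each distinct symbol character, locate all
--     # of its occurrences with str.find; merge the position lists by sorting.
--     def occurrences(ch):
--         out = []
--         j = input_string.find(ch)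
--         while j != -1:
--             out.append(j)
--             j = input_string.find(ch, j + 1)
--         return out
--     positions = []
--     for ch in sorted(set(input_string)):
--         if not ch.isdigit() and ch != '.':
--             positions.extend(occurrences(ch))
--     positions.sort()
--     result = {(row, i) for i in positions}
--     gears = {(row, i) for i in occurrences('*')}
--     return result, gears
-- ===== Notes on version B (the rewrite author's own statement) =====
-- stated objective: alternative
-- what changed: B replaces A's single character-by-character scan maintaining two sets with a character-class driven search: it iterates over the distinct characters of the string, locates each symbol character's occurrences via repeated str.find jumps, merges the position lists by sorting, and obtains the gears directly as the occurrence list of '*'.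
import Mathlib
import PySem

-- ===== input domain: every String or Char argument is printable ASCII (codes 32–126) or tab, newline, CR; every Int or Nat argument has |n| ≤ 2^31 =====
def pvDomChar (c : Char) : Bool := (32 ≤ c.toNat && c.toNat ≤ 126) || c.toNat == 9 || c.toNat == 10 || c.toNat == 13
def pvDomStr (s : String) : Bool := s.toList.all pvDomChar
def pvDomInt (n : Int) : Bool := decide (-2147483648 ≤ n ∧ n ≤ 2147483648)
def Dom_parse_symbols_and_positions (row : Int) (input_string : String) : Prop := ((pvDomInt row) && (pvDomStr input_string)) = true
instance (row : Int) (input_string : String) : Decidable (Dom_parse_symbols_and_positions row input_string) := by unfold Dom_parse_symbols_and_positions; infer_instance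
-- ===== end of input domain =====

-- B replaces A's char-by-char scan (maintaining both sets in one loop) by a character-class
-- driven search: per distinct symbol character, find its occurrences via repeated find jumps,
-- merge by sorting; gears are the occurrence list of '*'.

-- ===== PORT A =====
-- one loop over enumerate(input_string) maintaining both sets at once
def parse_symbols_and_positions (row : Int) (input_string : String) : (List (Int × Int)) × (List (Int × Int)) :=
  (PySem.List.enumerate input_string.toList 0).foldl
    (fun (st : PySem.Set (Int × Int) × PySem.Set (Int × Int)) p =>
      if !PySem.Chars.isdigit p.2 && p.2 != '.' then
        (PySem.Set.add st.1 (row, p.1),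
         if p.2 == '*' then PySem.Set.add st.2 (row, p.1) else st.2)
      else st)
    ([], [])

-- bounds needed for the termination of the find loop
theorem pv_findFrom_gt (cs : List Char) (ch : Char) (k : Nat) (h : cs.length < k) :
    PySem.Chars.findFrom cs [ch] (k : Int) none = -1 := by
  unfold PySem.Chars.findFrom
  simp
  intro h1 _
  exfalso
  rw [if_neg (by omega : ¬ ((k : Int) < 0))] at h1
  omega

theorem pvOccFrom_dec (cs : List Char) (ch : Char) (start : Nat)
    (h : ¬ PySem.Chars.findFrom cs [ch] (start : Int) none = -1) :
    cs.length + 1 - ((PySem.Chars.findFrom cs [ch] (start : Int) none).toNat + 1) < cs.length + 1 - start := by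
  by_cases hs : start ≤ cs.length
  · obtain ⟨hle, hpre, -⟩ := PySem.Chars.findFrom_natCast_spec cs [ch] start hs h
    have hlen := hpre.length_le
    simp only [List.length_drop, List.length_cons, List.length_nil] at hlen
    omega
  · exact absurd (pv_findFrom_gt cs ch start (by omega)) h

-- ===== PORT B =====
-- the while loop 'j = s.find(ch); while j != -1: out.append(j); j = s.find(ch, j+1)'
def pvOccFrom (cs : List Char) (ch : Char) (start : Nat) : List Int :=
  let j := PySem.Chars.findFrom cs [ch] (start : Int) none
  if h : j = -1 then [] else j :: pvOccFrom cs ch (j.toNat + 1)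
termination_by cs.length + 1 - start
decreasing_by exact pvOccFrom_dec cs ch start h

-- B: per distinct symbol character, find its occurrences; merge by sorting; gears = occurrences('*')
def parse_symbols_and_positions_alt (row : Int) (input_string : String) : (List (Int × Int)) × (List (Int × Int)) :=
  let cs := input_string.toList
  let positions :=
    (PySem.List.sorted (PySem.Set.ofList cs) (fun c => c) false).foldl
      (fun (acc : List Int) ch =>
        if !PySem.Chars.isdigit ch && ch != '.' then acc ++ pvOccFrom cs ch 0 else acc) []
  let positions := PySem.List.sorted positions (fun i => i) false
  (PySem.Set.ofList (positions.map (fun i => (row, i))),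
   PySem.Set.ofList ((pvOccFrom cs '*' 0).map (fun i => (row, i))))

-- ===== PRECONDITION & SPEC =====
def Spec_parse_symbols_and_positions (row : Int) (input_string : String) (out : (List (Int × Int)) × (List (Int × Int))) : Prop := out = parse_symbols_and_positions_alt row input_string
instance (row : Int) (input_string : String) (out : (List (Int × Int)) × (List (Int × Int))) : Decidable (Spec_parse_symbols_and_positions row input_string out) := by unfold Spec_parse_symbols_and_positions; infer_instance

-- ===== CLAIM (what is proved, stated in full; the proofs are below) =====
def Claim_equal_parse_symbols_and_positions : Prop := ∀ (row : Int) (input_string : String), Dom_parse_symbols_and_positions row input_string → Spec_parse_symbols_and_positions row input_string (parse_symbols_and_positions row input_string)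

-- ===== LEMMAS AND PROOFS =====

-- a singleton is a prefix exactly when it is the head
theorem pv_singleton_prefix (a : Char) (l : List Char) : [a] <+: l ↔ l.head? = some a := by
  cases l <;> simp [List.cons_prefix_cons, eq_comm]

-- entries of enumerate cs 0 are (k, cs[k]) with k < len
theorem pv_mem_enum (cs : List Char) (p : Int × Char) (h : p ∈ PySem.List.enumerate cs 0) :
    ∃ (k : Nat) (hk : k < cs.length), p = ((k : Int), cs[k]) := by
  rw [PySem.List.mem_enumerate_iff] at h
  obtain ⟨k, hk, rfl⟩ := h
  exact ⟨k, hk, by simp⟩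

-- splitting the filtered enumeration at the first match at index j
theorem pv_filter_enum_first (cs : List Char) (ch : Char) (start j : Nat)
    (hsj : start ≤ j) (hj : j < cs.length) (hcj : cs[j] = ch)
    (hmin : ∀ i : Nat, start ≤ i → i < j → cs[i]? ≠ some ch) :
    (PySem.List.enumerate cs 0).filter (fun p => decide ((start : Int) ≤ p.1) && p.2 == ch)
      = ((j : Int), ch) ::
        (PySem.List.enumerate cs 0).filter (fun p => decide (((j : Int) + 1) ≤ p.1) && p.2 == ch) := by
  have hlen : (cs.take j).length = j := by simp [Nat.min_eq_left (Nat.le_of_lt hj)]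
  have hE1 : ∀ p ∈ PySem.List.enumerate (cs.take j) 0,
      ∃ (k : Nat) (hk : k < j), p = ((k : Int), cs[k]'(by omega)) := by
    intro p hp
    obtain ⟨k, hk, rfl⟩ := pv_mem_enum _ p hp
    rw [hlen] at hk
    exact ⟨k, hk, by simp [List.getElem_take]⟩
  have hE2 : ∀ p ∈ PySem.List.enumerate (cs.drop (j + 1)) ((j : Int) + 1),
      (j : Int) + 1 ≤ p.1 := by
    intro p hp
    rw [PySem.List.mem_enumerate_iff] at hp
    obtain ⟨k, hk, rfl⟩ := hp
    simp

  conv_lhs => rw [← List.take_append_drop j cs]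
  conv_rhs => rw [← List.take_append_drop j cs]
  rw [List.drop_eq_getElem_cons hj]
  rw [PySem.List.enumerate_append, PySem.List.enumerate_cons]
  simp only [hlen, List.filter_append, List.filter_cons, zero_add]
  have h1 : (PySem.List.enumerate (cs.take j) 0).filter
      (fun p => decide ((start : Int) ≤ p.1) && p.2 == ch) = [] := by
    rw [List.filter_eq_nil_iff]
    intro p hp
    obtain ⟨k, hk, rfl⟩ := hE1 p hp
    simp only [Bool.and_eq_true, decide_eq_true_eq, beq_iff_eq]
    rintro ⟨hks, hc⟩
    exact hmin k (by exact_mod_cast hks) hk (by rw [List.getElem?_eq_getElem (by omega), hc])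
  have h2 : (PySem.List.enumerate (cs.take j) 0).filter
      (fun p => decide ((j : Int) + 1 ≤ p.1) && p.2 == ch) = [] := by
    rw [List.filter_eq_nil_iff]
    intro p hp
    obtain ⟨k, hk, rfl⟩ := hE1 p hp
    simp only [Bool.and_eq_true, decide_eq_true_eq, beq_iff_eq]
    rintro ⟨hks, -⟩
    omega
  have h3 : (decide ((start : Int) ≤ (j : Int)) && ch == ch) = true := by
    simp only [Bool.and_eq_true, decide_eq_true_eq, beq_self_eq_true, and_true]
    omega
  have h4 : ¬ ((decide ((j : Int) + 1 ≤ (j : Int)) && ch == ch) = true) := by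
    simp only [Bool.and_eq_true, decide_eq_true_eq, beq_self_eq_true, and_true]
    omega
  rw [h1, h2]
  simp only [List.nil_append, hcj]
  rw [if_pos h3, if_neg h4]
  congr 1
  exact List.filter_congr (fun p hp => by
    have hp1 := hE2 p hp
    have e1 : decide ((start : Int) ≤ p.1) = true := by rw [decide_eq_true_eq]; omega
    have e2 : decide ((j : Int) + 1 ≤ p.1) = true := by rw [decide_eq_true_eq]; omega
    rw [e1, e2])

-- the find loop returns exactly the (ascending) indices ≥ start where the character occurs
theorem pv_occFrom_eq (cs : List Char) (ch : Char) (start : Nat) :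
    pvOccFrom cs ch start
      = ((PySem.List.enumerate cs 0).filter
          (fun p => decide ((start : Int) ≤ p.1) && p.2 == ch)).map (fun p => p.1) := by
  fun_induction pvOccFrom cs ch start with
  | case1 start j hj =>
    have hj' : PySem.Chars.findFrom cs [ch] ((start : Nat) : Int) none = -1 := hj
    symm
    rw [List.map_eq_nil_iff, List.filter_eq_nil_iff]
    intro p hp
    obtain ⟨k, hk, rfl⟩ := pv_mem_enum _ p hp
    simp only [Bool.and_eq_true, decide_eq_true_eq, beq_iff_eq]
    rintro ⟨hks, hc⟩
    by_cases hs : start ≤ cs.length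
    · have hnin : ¬ [ch] <:+: cs.drop start := by
        rw [← PySem.Chars.findFrom_natCast_eq_neg_one_iff cs [ch] start hs]
        exact hj'
      apply hnin
      rw [List.singleton_infix_iff]
      have : cs[k] = (cs.drop start)[k - start]'(by simp; omega) := by
        rw [List.getElem_drop]
        congr 1
        omega
      rw [hc] at this
      exact this ▸ List.getElem_mem _
    · omega
  | case2 start j hj ih =>
    have hj' : ¬ PySem.Chars.findFrom cs [ch] ((start : Nat) : Int) none = -1 := hj
    have hs : start ≤ cs.length := by
      by_contra hgt
      exact hj' (pv_findFrom_gt cs ch start (by omega))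
    obtain ⟨hle, hpre, hmin⟩ := PySem.Chars.findFrom_natCast_spec cs [ch] start hs hj'
    have hjdef : j = PySem.Chars.findFrom cs [ch] ((start : Nat) : Int) none := rfl
    rw [hjdef]
    have hj0 : 0 ≤ PySem.Chars.findFrom cs [ch] (start : Int) none := le_trans (by omega) hle
    set jn := (PySem.Chars.findFrom cs [ch] (start : Int) none).toNat with hjn
    have hjcast : PySem.Chars.findFrom cs [ch] (start : Int) none = (jn : Int) := by omega
    have hjlt : jn < cs.length := by
      have := hpre.length_le
      simp only [List.length_drop, List.length_cons, List.length_nil] at this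
      omega
    have hcj : cs[jn] = ch := by
      rw [pv_singleton_prefix, List.head?_drop, List.getElem?_eq_getElem hjlt] at hpre
      exact Option.some.inj hpre
    have hminp : ∀ i : Nat, start ≤ i → i < jn → cs[i]? ≠ some ch := by
      intro i h1 h2 hcontra
      apply hmin i h1 h2
      rw [pv_singleton_prefix, List.head?_drop]
      exact hcontra
    rw [pv_filter_enum_first cs ch start jn (by omega) hjlt hcj hminp]
    rw [List.map_cons]
    have hcast : ((jn : Int) + 1) = ((jn + 1 : Nat) : Int) := by push_cast; ring
    rw [hjcast, hcast, ih]

theorem pv_occ0_eq (cs : List Char) (ch : Char) :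
    pvOccFrom cs ch 0
      = ((PySem.List.enumerate cs 0).filter (fun p => p.2 == ch)).map (fun p => p.1) := by
  rw [pv_occFrom_eq]
  congr 1
  apply List.filter_congr
  intro p hp
  obtain ⟨k, hk, rfl⟩ := pv_mem_enum _ p hp
  simp

-- a conditional set-insertion loop over pairs with distinct first components is append-filter-map
theorem pv_fold_add_if (row : Int) (q : Int × Char → Bool) (l : List (Int × Char))
    (acc : List (Int × Int)) (hnd : (l.map (fun p => p.1)).Nodup)
    (hacc : ∀ p ∈ l, (row, p.1) ∉ acc) :
    l.foldl (fun a p => if q p then PySem.Set.add a (row, p.1) else a) acc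
      = acc ++ (l.filter q).map (fun p => (row, p.1)) := by
  induction l generalizing acc with
  | nil => simp
  | cons p l ih =>
    simp only [List.map_cons, List.nodup_cons] at hnd
    have hmemacc : (row, p.1) ∉ acc := hacc p (by simp)
    have hacc' : ∀ p' ∈ l, (row, p'.1) ∉ acc ++ [(row, p.1)] := by
      intro p' hp'
      simp only [List.mem_append, List.mem_singleton, Prod.mk.injEq]
      push Not
      refine ⟨hacc p' (by simp [hp']), fun _ => ?_⟩
      intro hfst
      exact hnd.1 (by rw [← hfst]; exact List.mem_map_of_mem hp')
    by_cases hq : q p = true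
    · have : PySem.Set.add acc (row, p.1) = acc ++ [(row, p.1)] := by
        simp [PySem.Set.add, PySem.Set.contains, hmemacc]
      simp only [List.foldl_cons, hq, if_pos, this]
      rw [ih _ hnd.2 hacc']
      simp [hq]
    · simp only [Bool.not_eq_true] at hq
      simp only [List.foldl_cons, hq, Bool.false_eq_true, if_false]
      rw [ih _ hnd.2 (fun p' hp' => hacc p' (by simp [hp']))]
      simp [hq]

-- sum of a 0/v indicator over a nodup list
theorem pv_sum_indicator (C : List Char) (a : Char) (v : Nat) (hnd : C.Nodup) :
    (C.map (fun c => if a = c then v else 0)).sum = if a ∈ C then v else 0 := by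
  induction C with
  | nil => simp
  | cons c C ih =>
    simp only [List.nodup_cons] at hnd
    by_cases hc : a = c
    · subst hc
      simp [ih hnd.2, hnd.1]
    · simp [hc, ih hnd.2]

-- grouping the symbol entries by character is a permutation of the symbol entries
theorem pv_flat_perm (cs : List Char) (C : List Char) (q : Char → Bool)
    (hnd : C.Nodup) (hmem : ∀ c ∈ cs, c ∈ C) :
    ((C.filter q).flatMap
        (fun ch => (PySem.List.enumerate cs 0).filter (fun p => p.2 == ch))).Perm
      ((PySem.List.enumerate cs 0).filter (fun p => q p.2)) := by
  rw [List.perm_iff_count]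
  intro p
  rw [List.count_flatMap]
  have hterm : ∀ ch : Char, (List.count p ∘ fun ch => (PySem.List.enumerate cs 0).filter (fun p => p.2 == ch)) ch
      = if p.2 = ch then List.count p (PySem.List.enumerate cs 0) else 0 := by
    intro ch
    by_cases hch : p.2 = ch
    · simp only [Function.comp_apply, if_pos hch]
      exact List.count_filter (by simp [hch])
    · simp only [Function.comp_apply, if_neg hch]
      apply List.count_eq_zero_of_not_mem
      simp only [List.mem_filter]
      rintro ⟨-, h2⟩
      exact hch (by simpa using h2)
  rw [List.map_congr_left (fun ch _ => hterm ch), pv_sum_indicator _ _ _ (hnd.filter q)]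
  by_cases hq : q p.2 = true
  · by_cases hpin : p ∈ PySem.List.enumerate cs 0
    · have : p.2 ∈ C.filter q := by
        rw [List.mem_filter]
        obtain ⟨k, hk, rfl⟩ := pv_mem_enum _ p hpin
        exact ⟨hmem _ (List.getElem_mem hk), hq⟩
      rw [if_pos this, List.count_filter (by simpa using hq)]
    · have h0 : List.count p (PySem.List.enumerate cs 0) = 0 :=
        List.count_eq_zero_of_not_mem hpin
      have h0' : List.count p ((PySem.List.enumerate cs 0).filter (fun p => q p.2)) = 0 :=
        List.count_eq_zero_of_not_mem (fun h => hpin (List.mem_of_mem_filter h))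
      simp [h0, h0']
  · simp only [Bool.not_eq_true] at hq
    have h0' : List.count p ((PySem.List.enumerate cs 0).filter (fun p => q p.2)) = 0 := by
      apply List.count_eq_zero_of_not_mem
      rw [List.mem_filter]
      rintro ⟨-, h⟩
      simp [hq] at h
    rw [h0']
    split_ifs with h
    · rw [List.mem_filter] at h
      simp [hq] at h
    · rfl

-- A's self-contained pieces, named for the final assembly
theorem pv_enum_fst_nodup (cs : List Char) :
    ((PySem.List.enumerate cs 0).map (fun p => p.1)).Nodup := by
  rw [PySem.List.map_fst_enumerate]
  exact PySem.List.nodup_pyRange_one _ _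

-- A's combined loop is the pair of the two independent insertion loops
theorem pv_A_split (row : Int) (cs : List Char) :
    (PySem.List.enumerate cs 0).foldl
      (fun (st : PySem.Set (Int × Int) × PySem.Set (Int × Int)) p =>
        if !PySem.Chars.isdigit p.2 && p.2 != '.' then
          (PySem.Set.add st.1 (row, p.1),
           if p.2 == '*' then PySem.Set.add st.2 (row, p.1) else st.2)
        else st)
      ([], [])
    = (((PySem.List.enumerate cs 0).filter (fun p => !PySem.Chars.isdigit p.2 && p.2 != '.')).map
         (fun p => (row, p.1)),
       ((PySem.List.enumerate cs 0).filter (fun p => p.2 == '*')).map (fun p => (row, p.1))) := by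
  have hstep : (fun (st : PySem.Set (Int × Int) × PySem.Set (Int × Int)) (p : Int × Char) =>
      if !PySem.Chars.isdigit p.2 && p.2 != '.' then
        (PySem.Set.add st.1 (row, p.1),
         if p.2 == '*' then PySem.Set.add st.2 (row, p.1) else st.2)
      else st)
    = fun st p =>
        ((fun acc (p : Int × Char) =>
            if !PySem.Chars.isdigit p.2 && p.2 != '.' then PySem.Set.add acc (row, p.1) else acc) st.1 p,
         (fun acc (p : Int × Char) =>
            if p.2 == '*' then PySem.Set.add acc (row, p.1) else acc) st.2 p) := by
    funext st p
    by_cases hsym : (!PySem.Chars.isdigit p.2 && p.2 != '.') = true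
    · simp [hsym]
    · have hstar : (p.2 == '*') = false := by
        by_contra hne
        rw [Bool.not_eq_false, beq_iff_eq] at hne
        exact hsym (by rw [hne]; decide)
      simp [hsym, hstar]
  rw [hstep, PySem.List.foldl_prod_mk
        (f := fun acc (p : Int × Char) =>
          if !PySem.Chars.isdigit p.2 && p.2 != '.' then PySem.Set.add acc (row, p.1) else acc)
        (g := fun acc (p : Int × Char) =>
          if p.2 == '*' then PySem.Set.add acc (row, p.1) else acc)]
  rw [pv_fold_add_if row _ _ [] (pv_enum_fst_nodup cs) (by simp),
      pv_fold_add_if row _ _ [] (pv_enum_fst_nodup cs) (by simp)]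
  simp

-- a filtered enumeration mapped through (row, ·.1) has no duplicates
theorem pv_filtered_nodup (row : Int) (cs : List Char) (q : Int × Char → Bool) :
    (((PySem.List.enumerate cs 0).filter q).map (fun p => (row, p.1))).Nodup := by
  have h := (PySem.List.pairwise_lt_enumerate cs 0).filter q
  refine List.Pairwise.map (fun (p : Int × Char) => (row, p.1)) ?_ h
  intro a b hab hc
  exact absurd (congrArg Prod.snd hc) (ne_of_lt hab)

-- ===== VERDICT (by name: the statement is the Claim_ definition above) =====
theorem parse_symbols_and_positions_spec : Claim_equal_parse_symbols_and_positions := by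
  intro row s hdom
  unfold Spec_parse_symbols_and_positions parse_symbols_and_positions parse_symbols_and_positions_alt
  rw [pv_A_split row s.toList]
  set cs := s.toList with hcs
  set C := PySem.List.sorted (PySem.Set.ofList cs) (fun c => c) false with hC
  have hCnd : C.Nodup :=
    (PySem.List.sorted_perm (PySem.Set.ofList cs) (fun c => c) false).nodup_iff.mpr
      (PySem.Set.nodup_ofList cs)
  have hCmem : ∀ c ∈ cs, c ∈ C := fun c hc =>
    (PySem.List.sorted_perm (PySem.Set.ofList cs) (fun c => c) false).mem_iff.mpr
      ((PySem.Set.mem_ofList cs c).mpr hc)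
  -- the flattened per-character occurrence lists
  have hfold : C.foldl
      (fun (acc : List Int) ch =>
        if !PySem.Chars.isdigit ch && ch != '.' then acc ++ pvOccFrom cs ch 0 else acc) []
      = ((C.filter (fun ch => !PySem.Chars.isdigit ch && ch != '.')).flatMap
          (fun ch => (PySem.List.enumerate cs 0).filter (fun p => p.2 == ch))).map
          (fun p => p.1) := by
    rw [PySem.List.foldl_if_eq_foldl_filter (fun ch => !PySem.Chars.isdigit ch && ch != '.')
          (fun acc ch => acc ++ pvOccFrom cs ch 0)]
    rw [PySem.List.foldl_append_eq_flatMap (fun ch => pvOccFrom cs ch 0)]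
    rw [List.nil_append, List.map_flatMap]
    exact List.flatMap_congr (fun ch _ => pv_occ0_eq cs ch)
  have hperm : (((C.filter (fun ch => !PySem.Chars.isdigit ch && ch != '.')).flatMap
        (fun ch => (PySem.List.enumerate cs 0).filter (fun p => p.2 == ch))).map
        (fun p => p.1)).Perm
      (((PySem.List.enumerate cs 0).filter (fun p => !PySem.Chars.isdigit p.2 && p.2 != '.')).map
        (fun p => p.1)) :=
    (pv_flat_perm cs C (fun ch => !PySem.Chars.isdigit ch && ch != '.') hCnd hCmem).map _
  have hpair : ((((PySem.List.enumerate cs 0).filter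
        (fun p => !PySem.Chars.isdigit p.2 && p.2 != '.')).map (fun p => p.1)).Pairwise (· < ·)) :=
    List.Pairwise.map _ (fun a b h => h)
      ((PySem.List.pairwise_lt_enumerate cs 0).filter _)
  have hsorted := PySem.List.sorted_eq_of_perm_of_pairwise_lt _ _ (fun (i : Int) => i)
    hperm.symm hpair
  dsimp only
  rw [hfold, hsorted]
  -- both components: drop the redundant set() around a duplicate-free list
  have hmapmap : ∀ (l : List (Int × Char)),
      (l.map (fun p => p.1)).map (fun i => (row, i)) = l.map (fun p => (row, p.1)) := by
    intro l
    rw [List.map_map]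
    rfl
  rw [pv_occ0_eq cs '*', hmapmap, hmapmap]
  rw [PySem.Set.ofList_eq_self_of_nodup _ (pv_filtered_nodup row cs _),
      PySem.Set.ofList_eq_self_of_nodup _ (pv_filtered_nodup row cs _)]
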